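-- pv_equiv track=rewrite | github.com/schnell18/lm-quant-toolkit | src/lm_quant_toolkit/utils/modules.py | _iter_qwen35_quant_keys
-- ===== SOURCE A (Python) =====
-- LLM_QUANT_MODULES = [
--     "self_attn.q_proj",
--     "self_attn.k_proj",
--     "self_attn.v_proj",
--     "self_attn.o_proj",
--     "mlp.gate_proj",
--     "mlp.down_proj",
--     "mlp.up_proj",
-- ]
--
-- QWEN35_FULL_ATTN_INTERVAL = 4
--
-- def _iter_qwen35_quant_keys(layers):
--     start = QWEN35_FULL_ATTN_INTERVAL - 1
--     step = QWEN35_FULL_ATTN_INTERVAL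
--     full_attn_layers = set(range(start, layers, step))
--     prefix = "model.language_model.layers"
--     for module in LLM_QUANT_MODULES:
--         is_attn = module.startswith("self_attn.")
--         for layer in range(layers):
--             if is_attn and layer not in full_attn_layers:
--                 continue
--             yield module, layer, f"{prefix}.{layer}.{module}.weight"
-- ===== SOURCE B (Python) =====
-- LLM_QUANT_MODULES = [
--     "self_attn.q_proj",
--     "self_attn.k_proj",
--     "self_attn.v_proj",
--     "self_attn.o_proj",
--     "mlp.gate_proj",
--     "mlp.down_proj",
--     "mlp.up_proj",
-- ]
--
-- QWEN35_FULL_ATTN_INTERVAL = 4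
--
-- def _iter_qwen35_quant_keys(layers):
--     prefix = "model.language_model.layers"
--     for module in LLM_QUANT_MODULES:
--         if module.startswith("self_attn."):
--             layer_range = range(QWEN35_FULL_ATTN_INTERVAL - 1, layers,
--                                 QWEN35_FULL_ATTN_INTERVAL)
--         else:
--             layer_range = range(layers)
--         for layer in layer_range:
--             yield module, layer, f"{prefix}.{layer}.{module}.weight"
-- ===== Notes on version B (the rewrite author's own statement) =====
-- stated objective: simpler
-- what changed: B builds no full_attn_layers set and has no membership-test/continue branch: each module directly iterates the correct range (the stepped range for attention modules, range(layers) otherwise).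
import Mathlib
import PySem

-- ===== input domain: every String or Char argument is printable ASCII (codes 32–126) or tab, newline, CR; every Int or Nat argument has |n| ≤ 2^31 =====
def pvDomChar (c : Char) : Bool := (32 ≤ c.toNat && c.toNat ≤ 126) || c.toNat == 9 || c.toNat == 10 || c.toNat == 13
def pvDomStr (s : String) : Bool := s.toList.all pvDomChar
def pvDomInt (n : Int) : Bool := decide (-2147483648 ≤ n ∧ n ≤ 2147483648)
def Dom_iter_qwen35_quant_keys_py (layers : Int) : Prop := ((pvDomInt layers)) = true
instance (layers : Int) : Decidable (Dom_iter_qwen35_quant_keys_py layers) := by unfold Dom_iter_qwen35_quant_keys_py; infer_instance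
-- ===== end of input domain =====

-- B iterates the correct layer range per module directly (stepped range for attention
-- modules), removing A's full_attn_layers set, membership test and continue branch: simpler.


-- module-level constants of the Python file
def llmQuantModules : List String :=
  ["self_attn.q_proj", "self_attn.k_proj", "self_attn.v_proj", "self_attn.o_proj",
   "mlp.gate_proj", "mlp.down_proj", "mlp.up_proj"]

def qwen35FullAttnInterval : Int := 4

-- ===== PORT A =====
def iter_qwen35_quant_keys_py (layers : Int) : List (String × Int × String) :=
  let start := qwen35FullAttnInterval - 1
  let step := qwen35FullAttnInterval
  let fullAttnLayers : PySem.Set Int := PySem.Set.ofList (PySem.List.pyRange start layers step)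
  let pfx := "model.language_model.layers"
  llmQuantModules.foldl (fun acc module =>
    let isAttn := PySem.Str.startswith module "self_attn."
    (PySem.List.pyRange 0 layers 1).foldl (fun acc layer =>
      if isAttn && !(PySem.Set.contains fullAttnLayers layer) then acc
      else acc ++ [(module, layer, pfx ++ "." ++ PySem.Int.toStr layer ++ "." ++ module ++ ".weight")]) acc) []

-- ===== PORT B =====
def iter_qwen35_quant_keys_py_alt (layers : Int) : List (String × Int × String) :=
  let pfx := "model.language_model.layers"
  llmQuantModules.flatMap (fun module =>
    let layerRange :=
      if PySem.Str.startswith module "self_attn." then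
        PySem.List.pyRange (qwen35FullAttnInterval - 1) layers qwen35FullAttnInterval
      else
        PySem.List.pyRange 0 layers 1
    layerRange.map (fun layer =>
      (module, layer, pfx ++ "." ++ PySem.Int.toStr layer ++ "." ++ module ++ ".weight")))

-- ===== PRECONDITION & SPEC =====
def Spec_iter_qwen35_quant_keys_py (layers : Int) (out : List (String × Int × String)) : Prop := out = iter_qwen35_quant_keys_py_alt layers
instance (layers : Int) (out : List (String × Int × String)) : Decidable (Spec_iter_qwen35_quant_keys_py layers out) := by unfold Spec_iter_qwen35_quant_keys_py; infer_instance

-- ===== CLAIM (what is proved, stated in full; the proofs are below) =====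
def Claim_equal_iter_qwen35_quant_keys_py : Prop := ∀ (layers : Int), Dom_iter_qwen35_quant_keys_py layers → Spec_iter_qwen35_quant_keys_py layers (iter_qwen35_quant_keys_py layers)

-- ===== LEMMAS AND PROOFS =====

-- A's inner loop, which skips an element when the condition holds, is filter-then-map.
theorem foldl_if_skip {α β : Type} (c : α → Bool) (f : α → β) (l : List α) (acc : List β) :
    l.foldl (fun acc x => if c x then acc else acc ++ [f x]) acc
      = acc ++ (l.filter (fun x => !c x)).map f := by
  induction l generalizing acc with
  | nil => simp
  | cons x xs ih =>
    by_cases h : c x = true <;> simp [List.foldl_cons, h, ih, List.filter_cons]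

theorem pairwise_stepRange (n : Int) :
    (PySem.List.pyRange 3 n 4).Pairwise (· < ·) := by
  rw [PySem.List.pyRange_of_pos 3 n (by norm_num)]
  exact (List.pairwise_lt_range).map _ (fun a b h => by omega)

theorem filter_range_mem_stepRange (n : Int) :
    (PySem.List.pyRange 0 n 1).filter
        (fun x => PySem.Set.contains (PySem.Set.ofList (PySem.List.pyRange 3 n 4)) x)
      = PySem.List.pyRange 3 n 4 := by
  have hcont : ∀ x : Int,
      PySem.Set.contains (PySem.Set.ofList (PySem.List.pyRange 3 n 4)) x
        = decide (x ∈ PySem.List.pyRange 3 n 4) := by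
    intro x
    simp [PySem.Set.contains, PySem.Set.mem_ofList, List.contains_iff_mem]
  have hsorted₁ : ((PySem.List.pyRange 0 n 1).filter
      (fun x => PySem.Set.contains (PySem.Set.ofList (PySem.List.pyRange 3 n 4)) x)).Pairwise (· < ·) :=
    (PySem.List.pairwise_lt_pyRange_one 0 n).filter _
  apply List.Perm.eq_of_pairwise
    (fun a b _ _ h1 h2 => absurd h2 (not_lt.mpr (le_of_lt h1)))
    hsorted₁ (pairwise_stepRange n)
  apply (List.perm_ext_iff_of_nodup hsorted₁.nodup (pairwise_stepRange n).nodup).mpr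
  intro x
  simp only [List.mem_filter, hcont, decide_eq_true_eq]
  constructor
  · exact fun h => h.2
  · intro hx
    refine ⟨?_, hx⟩
    have := (PySem.List.mem_pyRange_iff_of_pos (by norm_num : (0:Int) < 4) x).mp hx
    exact (PySem.List.mem_pyRange_one).mpr ⟨by omega, this.2.1⟩

-- ===== VERDICT (by name: the statement is the Claim_ definition above) =====
theorem iter_qwen35_quant_keys_py_spec : Claim_equal_iter_qwen35_quant_keys_py := by
  intro layers _
  unfold Spec_iter_qwen35_quant_keys_py iter_qwen35_quant_keys_py iter_qwen35_quant_keys_py_alt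
  simp only [show qwen35FullAttnInterval = 4 from rfl, show (4:Int) - 1 = 3 from rfl,
    foldl_if_skip, PySem.List.foldl_append_eq_flatMap, List.nil_append]
  congr 1
  funext m
  by_cases hb : PySem.Str.startswith m "self_attn." = true
  · simp only [hb, if_pos, Bool.true_and, Bool.not_not, filter_range_mem_stepRange]
  · simp only [Bool.not_eq_true] at hb
    simp only [hb, if_neg, Bool.false_and, Bool.not_false, List.filter_true, Bool.false_eq_true,
      if_false]
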